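-- pv_equiv track=rewrite | github.com/stephanbos96/programmeren-opdrachten | school/les6/oefening acronym.py | acronym
-- ===== SOURCE A (Python) =====
-- def acronym(zin):
--     woorden = zin.split()
--     resultaat = ''
--     for woord in woorden:
--         character = woord[0]
--         resultaat += character
--     resultaat = resultaat.upper()
--     return resultaat
-- ===== SOURCE B (Python) =====
-- def acronym(zin):
--     resultaat = ''
--     vorige_was_spatie = True
--     for ch in zin:
--         if not ch.isspace() and vorige_was_spatie:
--             resultaat += ch
--         vorige_was_spatie = ch.isspace()
--     return resultaat.upper()
-- ===== Notes on version B (the rewrite author's own statement) =====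
-- stated objective: alternative
-- what changed: Replaces split()-then-take-word[0] tokenization by a single boundary-detecting character scan that appends a character exactly when it is non-whitespace and follows whitespace (or the start), never building the word list.
import Mathlib
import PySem

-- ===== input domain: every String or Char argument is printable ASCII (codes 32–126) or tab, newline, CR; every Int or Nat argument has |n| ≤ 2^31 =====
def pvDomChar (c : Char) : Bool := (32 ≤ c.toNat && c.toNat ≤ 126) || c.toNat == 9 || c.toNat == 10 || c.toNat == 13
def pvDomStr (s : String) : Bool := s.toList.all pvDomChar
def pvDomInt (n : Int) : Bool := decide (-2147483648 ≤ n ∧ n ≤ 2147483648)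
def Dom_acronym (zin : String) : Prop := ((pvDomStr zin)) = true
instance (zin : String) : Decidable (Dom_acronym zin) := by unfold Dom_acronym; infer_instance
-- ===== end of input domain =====

-- B replaces A's split()-then-word[0] tokenization by a single boundary-detecting scan (same cost class, no word list built).

-- ===== PORT A =====
-- woord[0] cannot raise: split() never yields an empty word, so the none branch of pyGet? is unreachable
def acronym (zin : String) : String :=
  let woorden := PySem.Chars.split₀ zin.toList
  let resultaat : List Char :=
    woorden.foldl (fun r w =>
      match PySem.List.pyGet? w 0 with
      | some c => r ++ [c]
      | none => r) []
  String.ofList (PySem.Chars.upper resultaat)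

-- ===== PORT B =====
def acronym_alt (zin : String) : String :=
  let st := zin.toList.foldl (fun (st : List Char × Bool) ch =>
    (if !PySem.Chars.isspace ch && st.2 then st.1 ++ [ch] else st.1,
     PySem.Chars.isspace ch)) ([], true)
  String.ofList (PySem.Chars.upper st.1)

-- ===== PRECONDITION & SPEC =====
def Spec_acronym (zin : String) (out : String) : Prop := out = acronym_alt zin
instance (zin : String) (out : String) : Decidable (Spec_acronym zin out) := by unfold Spec_acronym; infer_instance

-- ===== CLAIM (what is proved, stated in full; the proofs are below) =====
def Claim_equal_acronym : Prop := ∀ (zin : String), Dom_acronym zin → Spec_acronym zin (acronym zin)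

-- ===== LEMMAS AND PROOFS =====

-- pure form of B's scan: characters at word boundaries, prev = "previous char was whitespace (or start)"
def pvScan : List Char → Bool → List Char
  | [], _ => []
  | c :: rest, prev =>
    if !PySem.Chars.isspace c && prev then c :: pvScan rest (PySem.Chars.isspace c)
    else pvScan rest (PySem.Chars.isspace c)

theorem pvGet0_eq_head? (w : List Char) : PySem.List.pyGet? w 0 = w.head? := by
  cases w <;> simp [PySem.List.pyGet?, PySem.List.pyIdx?]

theorem pvFoldA (ws : List (List Char)) (r : List Char) :
    ws.foldl (fun r w =>
      match PySem.List.pyGet? w 0 with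
      | some c => r ++ [c]
      | none => r) r = r ++ ws.filterMap List.head? := by
  induction ws generalizing r with
  | nil => simp
  | cons w ws ih =>
    simp only [pvGet0_eq_head?] at ih ⊢
    simp only [List.foldl_cons, List.filterMap_cons]
    cases w <;> simp [ih]

theorem pvFoldB (cs : List Char) (res : List Char) (prev : Bool) :
    (cs.foldl (fun (st : List Char × Bool) ch =>
      (if !PySem.Chars.isspace ch && st.2 then st.1 ++ [ch] else st.1,
       PySem.Chars.isspace ch)) (res, prev)).1 = res ++ pvScan cs prev := by
  induction cs generalizing res prev with
  | nil => simp [pvScan]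
  | cons c rest ih =>
    by_cases h : (!PySem.Chars.isspace c && prev) = true
    · simp only [List.foldl_cons, h, if_true]
      rw [ih]
      simp [pvScan, h]
    · have h' : (!PySem.Chars.isspace c && prev) = false := by
        cases hb : (!PySem.Chars.isspace c && prev)
        · rfl
        · exact absurd hb h
      simp only [List.foldl_cons, h', Bool.false_eq_true, if_false]
      rw [ih]
      simp [pvScan, h']

theorem pvGoInv (cs cur : List Char) (acc : List (List Char)) :
    (PySem.Chars.split₀.go cs cur acc).filterMap List.head? =
      (acc.reverse ++ if cur.isEmpty then [] else [cur.reverse]).filterMap List.head?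
        ++ pvScan cs cur.isEmpty := by
  induction cs generalizing cur acc with
  | nil =>
    unfold PySem.Chars.split₀.go
    cases h : cur.isEmpty <;> simp [pvScan]
  | cons c rest ih =>
    unfold PySem.Chars.split₀.go
    by_cases hs : PySem.Chars.isspace c = true
    · cases hc : cur.isEmpty <;>
        simp [hs, pvScan, ih, List.filterMap_append]
    · have hs' : PySem.Chars.isspace c = false := by
        cases h : PySem.Chars.isspace c
        · rfl
        · exact absurd h hs
      cases hc : cur.isEmpty
      · have hcur : cur ≠ [] := by
          intro h; subst h; simp at hc
        have hrev : cur.reverse ≠ [] := by simpa using hcur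
        have hhead : ((c :: cur).reverse).head? = cur.reverse.head? := by
          rw [List.reverse_cons, List.head?_append_of_ne_nil _ hrev]
        have h1 : (c :: cur).isEmpty = false := rfl
        rw [if_neg hs, ih (c :: cur) acc]
        simp only [h1, Bool.false_eq_true, if_false]
        have h2 : pvScan (c :: rest) false = pvScan rest false := by
          simp [pvScan, hs']
        rw [h2]
        obtain ⟨d, ds, hd⟩ := List.exists_cons_of_ne_nil hrev
        simp [List.filterMap_append, hd]
      · -- cur = []
        have hcur : cur = [] := List.isEmpty_iff.mp hc
        subst hcur
        simp [hs', pvScan, ih]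

theorem acronym_eq (zin : String) : acronym zin = acronym_alt zin := by
  unfold acronym acronym_alt
  have h1 := pvFoldA (PySem.Chars.split₀ zin.toList) []
  have h2 := pvFoldB zin.toList [] true
  have h3 := pvGoInv zin.toList [] []
  simp only [PySem.Chars.split₀] at h1 ⊢
  rw [h1, h2, h3]
  simp

-- ===== VERDICT (by name: the statement is the Claim_ definition above) =====
theorem acronym_spec : Claim_equal_acronym := by
  intro zin _
  unfold Spec_acronym
  exact acronym_eq zin
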